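-- pv_equiv track=rewrite | github.com/severinleuenberger/R2D2-as-real-AI-companion | tests/rgb_led/test_08_pin21_scan.py | ws2812b_byte_to_spi
-- ===== SOURCE A (Python) =====
-- WS2812B_BIT_1 = 0b1110
--
-- WS2812B_BIT_0 = 0b1000
--
-- def ws2812b_byte_to_spi(byte_val):
--     """Convert byte to WS2812B SPI pattern."""
--     spi_bits = []
--     for bit_pos in range(7, -1, -1):
--         if (byte_val >> bit_pos) & 1:
--             spi_bits.append(WS2812B_BIT_1)
--         else:
--             spi_bits.append(WS2812B_BIT_0)
--
--     result = []
--     for i in range(0, 8, 2):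
--         byte = (spi_bits[i] << 4) | spi_bits[i + 1]
--         result.append(byte)
--
--     return result
-- ===== SOURCE B (Python) =====
-- _PAIR = (0x88, 0x8E, 0xE8, 0xEE)
--
-- def ws2812b_byte_to_spi(byte_val):
--     """Convert byte to WS2812B SPI pattern."""
--     return [_PAIR[(byte_val >> shift) % 4] for shift in (6, 4, 2, 0)]
-- ===== Notes on version B (the rewrite author's own statement) =====
-- stated objective: simpler
-- what changed: Replaces A's two passes (build eight 4-bit nibbles MSB-first, then merge adjacent nibbles into bytes) by a single pass over the four 2-bit fields of the input with a precomputed 4-entry lookup table of output bytes.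
import Mathlib
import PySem

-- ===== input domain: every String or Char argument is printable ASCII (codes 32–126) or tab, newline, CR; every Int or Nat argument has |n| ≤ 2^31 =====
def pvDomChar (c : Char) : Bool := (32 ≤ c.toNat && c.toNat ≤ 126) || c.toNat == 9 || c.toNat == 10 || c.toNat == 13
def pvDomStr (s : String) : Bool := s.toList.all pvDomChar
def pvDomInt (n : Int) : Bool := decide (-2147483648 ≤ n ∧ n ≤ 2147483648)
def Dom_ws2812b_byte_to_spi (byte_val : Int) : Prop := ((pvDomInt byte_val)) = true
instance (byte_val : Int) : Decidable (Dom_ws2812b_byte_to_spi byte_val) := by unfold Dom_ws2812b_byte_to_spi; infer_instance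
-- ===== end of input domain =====

-- B replaces A's two passes (eight nibbles, then merge adjacent pairs) by a single pass
-- over the four 2-bit fields of the input with a 4-entry lookup table of output bytes.


-- ===== PORT A =====
def WS2812B_BIT_1 : Int := 14
def WS2812B_BIT_0 : Int := 8

-- literal transliteration of A: first loop builds the eight nibbles spi_bits, second
-- loop merges adjacent nibble pairs (indices into spi_bits are always 0..7, in range,
-- so pyGetD's default is never used)
def ws2812b_byte_to_spi (byte_val : Int) : List Int :=
  let spi_bits : List Int := (PySem.List.pyRange 7 (-1) (-1)).foldl
    (fun acc bit_pos =>
      if PySem.Int.band (byte_val >>> bit_pos.toNat) 1 ≠ 0 then acc ++ [WS2812B_BIT_1]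
      else acc ++ [WS2812B_BIT_0]) []
  (PySem.List.pyRange 0 8 2).foldl
    (fun result i =>
      result ++ [PySem.Int.bor ((PySem.List.pyGetD spi_bits i 0) <<< (4 : Nat))
                               (PySem.List.pyGetD spi_bits (i + 1) 0)]) []

-- ===== PORT B =====
def pvPAIR : List Int := [0x88, 0x8E, 0xE8, 0xEE]

-- literal transliteration of B: one pass over the four 2-bit fields, table lookup
-- (the index (byte_val >> shift) % 4 is always 0..3, in range, so pyGetD's default
-- is never used)
def ws2812b_byte_to_spi_alt (byte_val : Int) : List Int :=
  ([6, 4, 2, 0] : List Int).map (fun shift =>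
    PySem.List.pyGetD pvPAIR (PySem.Int.mod (byte_val >>> shift.toNat) 4) 0)

-- ===== PRECONDITION & SPEC =====
def Spec_ws2812b_byte_to_spi (byte_val : Int) (out : List Int) : Prop := out = ws2812b_byte_to_spi_alt byte_val
instance (byte_val : Int) (out : List Int) : Decidable (Spec_ws2812b_byte_to_spi byte_val out) := by unfold Spec_ws2812b_byte_to_spi; infer_instance

-- ===== CLAIM (what is proved, stated in full; the proofs are below) =====
def Claim_equal_ws2812b_byte_to_spi : Prop := ∀ (byte_val : Int), Dom_ws2812b_byte_to_spi byte_val → Spec_ws2812b_byte_to_spi byte_val (ws2812b_byte_to_spi byte_val)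

-- ===== LEMMAS AND PROOFS =====

-- Python % with a positive modulus is Lean's emod
theorem pvMod_eq (a b : Int) (hb : 0 ≤ b) : PySem.Int.mod a b = a % b := by
  simp [PySem.Int.mod, Int.fmod_eq_emod, hb]

-- one output byte: A's pair of nibble tests on q = byte_val >>> k equals B's table
-- lookup at q % 4
theorem pvPair_eq (q : Int) :
    PySem.Int.bor ((if PySem.Int.mod (q / 2) 2 ≠ 0 then WS2812B_BIT_1 else WS2812B_BIT_0) <<< (4 : Nat))
                  (if PySem.Int.mod q 2 ≠ 0 then WS2812B_BIT_1 else WS2812B_BIT_0)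
      = PySem.List.pyGetD pvPAIR (PySem.Int.mod q 4) 0 := by
  rw [pvMod_eq (q / 2) 2 (by norm_num), pvMod_eq q 2 (by norm_num), pvMod_eq q 4 (by norm_num)]
  have h4 : q % 4 = 0 ∨ q % 4 = 1 ∨ q % 4 = 2 ∨ q % 4 = 3 := by omega
  rcases h4 with h | h | h | h
  · have h2 : ¬ (q % 2 ≠ 0) := by omega
    have hq2 : ¬ (q / 2 % 2 ≠ 0) := by omega
    rw [h, if_neg h2, if_neg hq2]; decide
  · have h2 : q % 2 ≠ 0 := by omega
    have hq2 : ¬ (q / 2 % 2 ≠ 0) := by omega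
    rw [h, if_pos h2, if_neg hq2]; decide
  · have h2 : ¬ (q % 2 ≠ 0) := by omega
    have hq2 : q / 2 % 2 ≠ 0 := by omega
    rw [h, if_neg h2, if_pos hq2]; decide
  · have h2 : q % 2 ≠ 0 := by omega
    have hq2 : q / 2 % 2 ≠ 0 := by omega
    rw [h, if_pos h2, if_pos hq2]; decide

-- reading a fixed slot of the literal eight-element nibble list
theorem pvGet0 (x0 x1 x2 x3 x4 x5 x6 x7 : Int) :
    PySem.List.pyGetD [x0, x1, x2, x3, x4, x5, x6, x7] 0 0 = x0 := rfl
theorem pvGet1 (x0 x1 x2 x3 x4 x5 x6 x7 : Int) :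
    PySem.List.pyGetD [x0, x1, x2, x3, x4, x5, x6, x7] 1 0 = x1 := rfl
theorem pvGet2 (x0 x1 x2 x3 x4 x5 x6 x7 : Int) :
    PySem.List.pyGetD [x0, x1, x2, x3, x4, x5, x6, x7] 2 0 = x2 := rfl
theorem pvGet3 (x0 x1 x2 x3 x4 x5 x6 x7 : Int) :
    PySem.List.pyGetD [x0, x1, x2, x3, x4, x5, x6, x7] 3 0 = x3 := rfl
theorem pvGet4 (x0 x1 x2 x3 x4 x5 x6 x7 : Int) :
    PySem.List.pyGetD [x0, x1, x2, x3, x4, x5, x6, x7] 4 0 = x4 := rfl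
theorem pvGet5 (x0 x1 x2 x3 x4 x5 x6 x7 : Int) :
    PySem.List.pyGetD [x0, x1, x2, x3, x4, x5, x6, x7] 5 0 = x5 := rfl
theorem pvGet6 (x0 x1 x2 x3 x4 x5 x6 x7 : Int) :
    PySem.List.pyGetD [x0, x1, x2, x3, x4, x5, x6, x7] 6 0 = x6 := rfl
theorem pvGet7 (x0 x1 x2 x3 x4 x5 x6 x7 : Int) :
    PySem.List.pyGetD [x0, x1, x2, x3, x4, x5, x6, x7] 7 0 = x7 := rfl

-- shifting one more bit is halving (stated at the four odd shifts the proof needs)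
theorem pvShift7 (a : Int) : a >>> (7 : Nat) = (a >>> (6 : Nat)) / 2 := by
  rw [Int.shiftRight_eq_div_pow, Int.shiftRight_eq_div_pow]; norm_num; omega
theorem pvShift5 (a : Int) : a >>> (5 : Nat) = (a >>> (4 : Nat)) / 2 := by
  rw [Int.shiftRight_eq_div_pow, Int.shiftRight_eq_div_pow]; norm_num; omega
theorem pvShift3 (a : Int) : a >>> (3 : Nat) = (a >>> (2 : Nat)) / 2 := by
  rw [Int.shiftRight_eq_div_pow, Int.shiftRight_eq_div_pow]; norm_num; omega
theorem pvShift1 (a : Int) : a >>> (1 : Nat) = (a >>> (0 : Nat)) / 2 := by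
  rw [Int.shiftRight_eq_div_pow, Int.shiftRight_eq_div_pow]; norm_num

-- ===== VERDICT (by name: the statement is the Claim_ definition above) =====
theorem ws2812b_byte_to_spi_spec : Claim_equal_ws2812b_byte_to_spi := by
  intro a _
  show ws2812b_byte_to_spi a = ws2812b_byte_to_spi_alt a
  have hite : ∀ (c : Prop) [Decidable c] (acc : List Int),
      (if c then acc ++ [WS2812B_BIT_1] else acc ++ [WS2812B_BIT_0])
        = acc ++ [if c then WS2812B_BIT_1 else WS2812B_BIT_0] := by
    intro c _ acc
    by_cases h : c
    · simp [h]
    · simp [h]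
  unfold ws2812b_byte_to_spi ws2812b_byte_to_spi_alt
  simp only [show PySem.List.pyRange 7 (-1) (-1) = [7, 6, 5, 4, 3, 2, 1, 0] from by decide,
             show PySem.List.pyRange 0 8 2 = [0, 2, 4, 6] from by decide,
             List.foldl, hite, List.nil_append, List.cons_append, List.map]
  simp only [Int.shiftRight_natCast_right,
             show ((7:Int).toNat) = (7:Nat) from rfl, show ((6:Int).toNat) = (6:Nat) from rfl,
             show ((5:Int).toNat) = (5:Nat) from rfl, show ((4:Int).toNat) = (4:Nat) from rfl,
             show ((3:Int).toNat) = (3:Nat) from rfl, show ((2:Int).toNat) = (2:Nat) from rfl,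
             show ((1:Int).toNat) = (1:Nat) from rfl, show ((0:Int).toNat) = (0:Nat) from rfl]
  rw [pvShift7 a, pvShift5 a, pvShift3 a, pvShift1 a]
  simp only [PySem.Int.band_one,
             show (0:Int) + 1 = 1 from rfl, show (2:Int) + 1 = 3 from rfl,
             show (4:Int) + 1 = 5 from rfl, show (6:Int) + 1 = 7 from rfl]
  simp only [pvGet0, pvGet1, pvGet2, pvGet3, pvGet4, pvGet5, pvGet6, pvGet7]
  simp only [pvPair_eq]
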